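-- pv_equiv track=rewrite | github.com/MichaelrKraft/leadspot-ai | backend/app/services/lead_scoring_service.py | _calculate_activity_score
-- ===== SOURCE A (Python) =====
-- ACTIVITY_SCORES = {
--     # High-value actions
--     "email.click": 15,
--     "page.hit": 8,
--     "form.submit": 25,
--     "asset.download": 20,
--
--     # Medium-value actions
--     "email.open": 5,
--     "email.send": 2,
--
--     # Low-value/automated actions
--     "lead.imported": 1,
--     "lead.created": 1,
--     "lead.stage_change": 3,
--     "lead.utm_tags": 2,
--
--     # Campaign engagement
--     "campaign.event": 5,
--     "campaign.kicked_off": 3,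
-- }
--
-- PAGE_BONUSES = {
--     "pricing": 20,
--     "demo": 25,
--     "contact": 15,
--     "quote": 20,
--     "trial": 25,
--     "signup": 20,
-- }
--
-- def _calculate_activity_score(events: list) -> tuple[int, dict]:
--     """
--     Calculate score from activity events.
--
--     Args:
--         events: List of activity events
--
--     Returns:
--         Tuple of (total_score, breakdown_dict)
--     """
--     total = 0
--     breakdown = {}
--
--     for event in events:
--         event_type = event.get("event", "")
--         details = event.get("eventLabel", "").lower() if event.get("eventLabel") else ""
--
--         # Get base score for event type
--         score = ACTIVITY_SCORES.get(event_type, 0)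
--
--         # Apply page bonuses for page hits
--         if event_type == "page.hit":
--             for keyword, bonus in PAGE_BONUSES.items():
--                 if keyword in details:
--                     score += bonus
--                     break
--
--         total += score
--
--         # Track breakdown
--         if event_type:
--             key = event_type
--             if key not in breakdown:
--                 breakdown[key] = {"count": 0, "points": 0}
--             breakdown[key]["count"] += 1
--             breakdown[key]["points"] += score
--
--     return total, breakdown
-- ===== SOURCE B (Python) =====
-- ACTIVITY_SCORES = {
--     "email.click": 15,
--     "page.hit": 8,
--     "form.submit": 25,
--     "asset.download": 20,
--     "email.open": 5,
--     "email.send": 2,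
--     "lead.imported": 1,
--     "lead.created": 1,
--     "lead.stage_change": 3,
--     "lead.utm_tags": 2,
--     "campaign.event": 5,
--     "campaign.kicked_off": 3,
-- }
--
-- PAGE_BONUSES = {
--     "pricing": 20,
--     "demo": 25,
--     "contact": 15,
--     "quote": 20,
--     "trial": 25,
--     "signup": 20,
-- }
--
--
-- def _calculate_activity_score(events: list) -> tuple[int, dict]:
--     # Counting algorithm: instead of accumulating a score per event, count how many
--     # events of each type occur (insertion-ordered) and sum page-hit bonuses aside;
--     # the points are then computed in closed form as count * base (+ bonus pot for
--     # "page.hit"), and the total is the sum of the breakdown's points.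
--     counts = {}
--     bonus_pot = 0
--     for event in events:
--         t = event.get("event", "")
--         if t:
--             counts[t] = counts.get(t, 0) + 1
--         if t == "page.hit":
--             label = event.get("eventLabel", "")
--             details = label.lower() if label else ""
--             bonus_pot += next((b for k, b in PAGE_BONUSES.items() if k in details), 0)
--     breakdown = {
--         t: {"count": c,
--             "points": c * ACTIVITY_SCORES.get(t, 0) + (bonus_pot if t == "page.hit" else 0)}
--         for t, c in counts.items()
--     }
--     total = sum(entry["points"] for entry in breakdown.values())
--     return total, breakdown
-- ===== Notes on version B (the rewrite author's own statement) =====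
-- stated objective: alternative
-- what changed: B replaces A's per-event score accumulation with a counting algorithm: the loop only counts events per type and sums page-hit bonuses into one pot; the breakdown's points are then computed in closed form as count*base_score (+ bonus pot for page.hit) and the total is derived by summing the breakdown, so no per-event score or running total is ever accumulated.
import Mathlib
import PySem

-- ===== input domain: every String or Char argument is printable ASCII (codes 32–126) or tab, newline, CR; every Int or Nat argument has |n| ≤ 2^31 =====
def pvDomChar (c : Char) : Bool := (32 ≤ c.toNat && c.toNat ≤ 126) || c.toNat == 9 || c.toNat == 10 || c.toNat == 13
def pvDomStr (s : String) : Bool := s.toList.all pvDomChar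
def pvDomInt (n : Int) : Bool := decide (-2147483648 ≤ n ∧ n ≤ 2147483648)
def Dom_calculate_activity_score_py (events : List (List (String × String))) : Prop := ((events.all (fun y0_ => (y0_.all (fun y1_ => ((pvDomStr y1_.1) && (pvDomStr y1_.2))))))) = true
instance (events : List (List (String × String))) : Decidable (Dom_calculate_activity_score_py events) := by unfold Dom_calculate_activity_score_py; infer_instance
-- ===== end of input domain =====

-- B re-implements A with a counting algorithm: the loop only counts events per type and pools page-hit bonuses; points/total are then derived arithmetically (count*base + pot); return values proved equal.


-- ===== PORT A =====
def ACTIVITY_SCORES : PySem.Dict String Int := PySem.Dict.mk [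
  ("email.click", 15), ("page.hit", 8), ("form.submit", 25), ("asset.download", 20),
  ("email.open", 5), ("email.send", 2),
  ("lead.imported", 1), ("lead.created", 1), ("lead.stage_change", 3), ("lead.utm_tags", 2),
  ("campaign.event", 5), ("campaign.kicked_off", 3)]

def PAGE_BONUSES : PySem.Dict String Int := PySem.Dict.mk [
  ("pricing", 20), ("demo", 25), ("contact", 15), ("quote", 20), ("trial", 25), ("signup", 20)]

-- A's inner loop: 'for keyword, bonus in PAGE_BONUSES.items(): if keyword in details: score += bonus; break'
def pageBonusLoop (items : List (String × Int)) (details : String) (score : Int) : Int :=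
  match items with
  | [] => score
  | (keyword, bonus) :: rest =>
      if PySem.Str.isIn keyword details then score + bonus
      else pageBonusLoop rest details score

-- A's loop body: state = (total, breakdown)
def aStep (st : Int × PySem.Dict String (PySem.Dict String Int)) (event : List (String × String)) :
    Int × PySem.Dict String (PySem.Dict String Int) :=
  let event_type := (PySem.Dict.mk event).getD "event" ""
  let label := (PySem.Dict.mk event).getD "eventLabel" ""
  let details := if label ≠ "" then PySem.Str.lower label else ""
  let score0 := ACTIVITY_SCORES.getD event_type 0
  let score := if event_type == "page.hit" then pageBonusLoop PAGE_BONUSES.items details score0 else score0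
  let total := st.1 + score
  if event_type ≠ "" then
    let b1 := if st.2.contains event_type then st.2
              else st.2.insert event_type (PySem.Dict.mk [("count", (0 : Int)), ("points", 0)])
    let inner := b1.getD event_type PySem.Dict.empty
    let inner := inner.insert "count" (inner.getD "count" 0 + 1)
    let inner := inner.insert "points" (inner.getD "points" 0 + score)
    (total, b1.insert event_type inner)
  else (total, st.2)

def calculate_activity_score_py (events : List (List (String × String))) : Int × (List (String × List (String × Int))) :=
  let st := events.foldl aStep (0, PySem.Dict.empty)
  (st.1, st.2.items.map (fun p => (p.1, p.2.items)))

-- ===== PORT B =====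
def evType (e : List (String × String)) : String := (PySem.Dict.mk e).getD "event" ""

-- B's 'next((b for k, b in PAGE_BONUSES.items() if k in details), 0)' for a page.hit event
def bBonus (e : List (String × String)) : Int :=
  let label := (PySem.Dict.mk e).getD "eventLabel" ""
  let details := if label ≠ "" then PySem.Str.lower label else ""
  (((PAGE_BONUSES.items.filter (fun p => PySem.Str.isIn p.1 details)).head?).map (·.2)).getD 0

-- B's loop body: state = (counts, bonus_pot)
def bPairStep (st : PySem.Dict String Int × Int) (e : List (String × String)) :
    PySem.Dict String Int × Int :=
  let t := evType e
  let counts := if t ≠ "" then st.1.insert t (st.1.getD t 0 + 1) else st.1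
  let pot := if t == "page.hit" then st.2 + bBonus e else st.2
  (counts, pot)

def calculate_activity_score_py_alt (events : List (List (String × String))) : Int × (List (String × List (String × Int))) :=
  let st := events.foldl bPairStep (PySem.Dict.empty, 0)
  let breakdown := st.1.items.map (fun p =>
    (p.1, [("count", p.2),
           ("points", p.2 * ACTIVITY_SCORES.getD p.1 0 + (if p.1 == "page.hit" then st.2 else 0))]))
  let total := (breakdown.map (fun q => (PySem.Dict.mk q.2).getD "points" 0)).sum
  (total, breakdown)

-- ===== PRECONDITION & SPEC =====
def Spec_calculate_activity_score_py (events : List (List (String × String))) (out : Int × (List (String × List (String × Int)))) : Prop := out = calculate_activity_score_py_alt events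
instance (events : List (List (String × String))) (out : Int × (List (String × List (String × Int)))) : Decidable (Spec_calculate_activity_score_py events out) := by unfold Spec_calculate_activity_score_py; infer_instance

-- ===== CLAIM (what is proved, stated in full; the proofs are below) =====
def Claim_equal_calculate_activity_score_py : Prop := ∀ (events : List (List (String × String))), Dom_calculate_activity_score_py events → Spec_calculate_activity_score_py events (calculate_activity_score_py events)

-- ===== LEMMAS AND PROOFS =====

-- B's closed-form points for a type with count c given bonus pot b
def pts (t : String) (c b : Int) : Int :=
  c * ACTIVITY_SCORES.getD t 0 + (if t == "page.hit" then b else 0)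

-- A's breakdown as a function of B's (counts, pot) state
def toBreak (g : PySem.Dict String Int) (b : Int) : PySem.Dict String (PySem.Dict String Int) :=
  PySem.Dict.mk (g.items.map (fun p => (p.1, PySem.Dict.mk [("count", p.2), ("points", pts p.1 p.2 b)])))

-- A's running total as a function of B's state
def totOf (g : PySem.Dict String Int) (b : Int) : Int :=
  (g.items.map (fun p => pts p.1 p.2 b)).sum

-- the invariant B's loop maintains
def BInv (g : PySem.Dict String Int) (b : Int) : Prop :=
  g.keys.Nodup ∧ (g.contains "page.hit" = false → b = 0)

theorem pageBonusLoop_eq (items : List (String × Int)) (details : String) (s : Int) :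
    pageBonusLoop items details s
      = s + ((((items.filter (fun p => PySem.Str.isIn p.1 details)).head?).map (·.2)).getD 0) := by
  induction items with
  | nil => simp [pageBonusLoop]
  | cons a rest ih =>
      obtain ⟨kw, bo⟩ := a
      by_cases h : PySem.Str.isIn kw details = true
      · simp only [pageBonusLoop, h, if_true, List.filter_cons, List.head?_cons,
          Option.map_some, Option.getD_some]
      · simp only [pageBonusLoop, h, if_false, List.filter_cons, Bool.false_eq_true, ih]

-- A's per-event state update, abstracted over (event_type, score)
def aBody (t : Int) (bd : PySem.Dict String (PySem.Dict String Int)) (et : String) (sc : Int) :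
    Int × PySem.Dict String (PySem.Dict String Int) :=
  if et ≠ "" then
    let b1 := if bd.contains et then bd
              else bd.insert et (PySem.Dict.mk [("count", (0 : Int)), ("points", 0)])
    let inner := b1.getD et PySem.Dict.empty
    let inner := inner.insert "count" (inner.getD "count" 0 + 1)
    let inner := inner.insert "points" (inner.getD "points" 0 + sc)
    (t + sc, b1.insert et inner)
  else (t + sc, bd)

theorem aStep_eq_body (st : Int × PySem.Dict String (PySem.Dict String Int))
    (e : List (String × String)) :
    aStep st e = aBody st.1 st.2 (evType e)
      (ACTIVITY_SCORES.getD (evType e) 0 + (if evType e == "page.hit" then bBonus e else 0)) := by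
  unfold aStep aBody bBonus evType
  by_cases h : ((PySem.Dict.mk e).getD "event" "") == "page.hit"
  · simp only [h, if_true, pageBonusLoop_eq]
  · simp only [h, Bool.false_eq_true, if_false, add_zero]

theorem contains_toBreak (g : PySem.Dict String Int) (b : Int) (k : String) :
    (toBreak g b).contains k = g.contains k := by
  obtain ⟨l⟩ := g
  unfold toBreak PySem.Dict.contains
  simp [List.any_map, Function.comp_def]

theorem get?_toBreak (g : PySem.Dict String Int) (b : Int) (k : String) :
    (toBreak g b).get? k
      = (g.get? k).map (fun c => PySem.Dict.mk [("count", c), ("points", pts k c b)]) := by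
  obtain ⟨l⟩ := g
  unfold toBreak PySem.Dict.get?
  induction l with
  | nil => simp
  | cons p rest ih =>
      by_cases h : p.1 == k
      · have : p.1 = k := by simpa using h
        simp [this]
      · simpa [h] using ih

theorem sum_map_replace (l : List (String × Int)) (et : String) (sc : Int)
    (f fr : String × Int → Int)
    (hnd : (l.map (·.1)).Nodup)
    (hne : ∀ p ∈ l, p.1 ≠ et → fr p = f p)
    (heq : ∀ p ∈ l, p.1 = et → fr p = f p + sc)
    (hmem : et ∈ l.map (·.1)) :
    (l.map fr).sum = (l.map f).sum + sc := by
  induction l with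
  | nil => simp at hmem
  | cons p rest ih =>
      simp only [List.map_cons, List.nodup_cons] at hnd
      by_cases hp : p.1 = et
      · have h1 : fr p = f p + sc := heq p (by simp) hp
        have h2 : ∀ q ∈ rest, fr q = f q := by
          intro q hq
          apply hne q (by simp [hq])
          intro hcon
          have hm : q.1 ∈ rest.map (·.1) := List.mem_map_of_mem hq
          rw [hcon, ← hp] at hm
          exact hnd.1 hm
        have : (rest.map fr) = rest.map f := List.map_congr_left h2
        simp [h1, this]
        ring
      · have h1 : fr p = f p := hne p (by simp) hp
        have hmem' : et ∈ rest.map (·.1) := by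
          rcases List.mem_cons.mp hmem with h | h
          · exact absurd h.symm hp
          · exact h
        have := ih hnd.2 (fun q hq => hne q (by simp [hq])) (fun q hq => heq q (by simp [hq])) hmem'
        simp [h1, this]
        ring

theorem pts_other (t : String) (c b d : Int) (et : String)
    (hne : t ≠ et) (hd : et ≠ "page.hit" → d = 0) :
    pts t c (b + d) = pts t c b := by
  unfold pts
  by_cases hph : t == "page.hit"
  · have ht : t = "page.hit" := by simpa using hph
    have : et ≠ "page.hit" := fun h => hne (ht.trans h.symm)
    simp [hd this]
  · simp [hph]

theorem step_main (g : PySem.Dict String Int) (b : Int) (e : List (String × String))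
    (hinv : BInv g b) :
    aStep (totOf g b, toBreak g b) e
      = (totOf (bPairStep (g, b) e).1 (bPairStep (g, b) e).2,
         toBreak (bPairStep (g, b) e).1 (bPairStep (g, b) e).2) := by
  obtain ⟨hnd, hb⟩ := hinv
  rw [aStep_eq_body]
  set et := evType e with het_def
  set Δ : Int := if et == "page.hit" then bBonus e else 0 with hΔ
  have hΔ0 : et ≠ "page.hit" → Δ = 0 := by
    intro h; simp [hΔ, h]
  have hpot : (bPairStep (g, b) e).2 = b + Δ := by
    unfold bPairStep
    by_cases h : et == "page.hit" <;> simp [← het_def, h, hΔ]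
  unfold aBody
  by_cases hemp : et = ""
  · -- empty event_type: score is 0, state unchanged
    have hΔz : Δ = 0 := hΔ0 (by simp [hemp])
    have hg : (bPairStep (g, b) e).1 = g := by unfold bPairStep; simp [← het_def, hemp]
    simp only [hemp, ne_eq, not_true_eq_false, if_false, hg, hpot, hΔz, add_zero]
    rw [show ACTIVITY_SCORES.getD "" 0 = 0 from by decide]
    simp
  · set sc : Int := ACTIVITY_SCORES.getD et 0 + Δ with hsc_def
    have hg : (bPairStep (g, b) e).1 = g.insert et (g.getD et 0 + 1) := by
      unfold bPairStep; simp [← het_def, hemp]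
    rw [hg, hpot]
    simp only [hemp, ne_eq, not_false_iff, if_pos]
    rw [contains_toBreak]
    by_cases hc : g.contains et = true
    · -- existing key: one entry of the breakdown is updated in place
      have hsome : (g.get? et).isSome := by rw [← PySem.Dict.contains_eq_isSome_get?, hc]
      obtain ⟨c, hcval⟩ := Option.isSome_iff_exists.mp hsome
      have hgd : g.getD et 0 = c := by rw [PySem.Dict.getD_eq_get?_getD, hcval]; rfl
      have hinner : (toBreak g b).getD et PySem.Dict.empty
          = PySem.Dict.mk [("count", c), ("points", pts et c b)] := by
        rw [PySem.Dict.getD_eq_get?_getD, get?_toBreak, hcval]; rfl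
      simp only [hc, if_pos, hinner]
      have h1 : (PySem.Dict.mk [("count", c), ("points", pts et c b)]).getD "count" 0 = c := by
        simp [PySem.Dict.getD, PySem.Dict.get?]
      have h2 : ((PySem.Dict.mk [("count", c), ("points", pts et c b)]).insert "count" (c + 1))
          = PySem.Dict.mk [("count", c + 1), ("points", pts et c b)] := by
        simp [PySem.Dict.insert, PySem.Dict.contains]
      have h3 : (PySem.Dict.mk [("count", c + 1), ("points", pts et c b)]).getD "points" 0
          = pts et c b := by
        simp [PySem.Dict.getD, PySem.Dict.get?]
      have h4 : ((PySem.Dict.mk [("count", c + 1), ("points", pts et c b)]).insert "points"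
            (pts et c b + sc))
          = PySem.Dict.mk [("count", c + 1), ("points", pts et c b + sc)] := by
        simp [PySem.Dict.insert, PySem.Dict.contains]
      rw [h1, h2, h3, h4]
      have hpts_et : pts et (c + 1) (b + Δ) = pts et c b + sc := by
        unfold pts
        by_cases hph : et == "page.hit"
        · simp only [hph, if_true, hsc_def, hΔ]; ring
        · have := hΔ0 (by simpa using hph)
          simp only [hph, Bool.false_eq_true, if_false, hsc_def, this]; ring
      have hitems : (g.insert et (g.getD et 0 + 1)).items
          = g.items.map (fun p => if p.1 == et then (et, c + 1) else p) := by
        rw [PySem.Dict.items_insert_of_contains g _ hc, hgd]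
      refine Prod.ext ?_ ?_
      · -- totals agree
        show totOf g b + sc = totOf (g.insert et (g.getD et 0 + 1)) (b + Δ)
        unfold totOf
        rw [hitems, List.map_map]
        simp only [Function.comp_def]
        rw [sum_map_replace g.items et sc (fun p => pts p.1 p.2 b)
          (fun p => pts ((if p.1 == et then (et, c + 1) else p) : String × Int).1
            ((if p.1 == et then (et, c + 1) else p) : String × Int).2 (b + Δ)) hnd]
        · intro p hp hne
          simp only [show (p.1 == et) = false by simpa using hne, Bool.false_eq_true, if_false]
          exact pts_other p.1 p.2 b Δ et hne hΔ0
        · intro p hp hpe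
          obtain ⟨p1, p2⟩ := p
          have hpeq : p1 = et := hpe
          subst hpeq
          have hps : g.get? et = some p2 := PySem.Dict.get?_of_mem_items g hp hnd
          rw [hcval] at hps
          have hp2 : p2 = c := (Option.some.inj hps).symm
          subst hp2
          simpa using hpts_et
        · exact (PySem.Dict.contains_iff_mem_keys g et).mp hc
      · -- breakdowns agree
        show (toBreak g b).insert et
            (PySem.Dict.mk [("count", c + 1), ("points", pts et c b + sc)])
          = toBreak (g.insert et (g.getD et 0 + 1)) (b + Δ)
        apply PySem.Dict.ext
        rw [PySem.Dict.items_insert_of_contains _ _ (by rw [contains_toBreak]; exact hc)]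
        unfold toBreak
        rw [hitems]
        show (g.items.map _).map _ = ((g.items.map _).map _)
        rw [List.map_map, List.map_map]
        apply List.map_congr_left
        intro p hp
        obtain ⟨p1, p2⟩ := p
        by_cases hpe : p1 = et
        · subst hpe
          have hps : g.get? et = some p2 := PySem.Dict.get?_of_mem_items g hp hnd
          rw [hcval] at hps
          have hp2 : p2 = c := (Option.some.inj hps).symm
          subst hp2
          simp [hpts_et]
        · simp [hpe, pts_other p1 p2 b Δ et hpe hΔ0]
    · -- fresh key: appended at the end
      have hcf : g.contains et = false := by simpa using hc
      have hgd : g.getD et 0 = 0 := PySem.Dict.getD_of_not_contains g 0 hcf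
      have hbz : et = "page.hit" → b = 0 := by
        intro h; exact hb (h ▸ hcf)
      simp only [hc, Bool.false_eq_true, if_false]
      have hgetins : ((toBreak g b).insert et
            (PySem.Dict.mk [("count", (0 : Int)), ("points", 0)])).getD et PySem.Dict.empty
          = PySem.Dict.mk [("count", (0 : Int)), ("points", 0)] := by
        rw [PySem.Dict.getD_eq_get?_getD, PySem.Dict.get?_insert_self]; rfl
      rw [hgetins]
      have h1 : (PySem.Dict.mk [("count", (0 : Int)), ("points", 0)]).getD "count" 0 = 0 := by
        simp [PySem.Dict.getD, PySem.Dict.get?]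
      have h2 : ((PySem.Dict.mk [("count", (0 : Int)), ("points", 0)]).insert "count" ((0 : Int) + 1))
          = PySem.Dict.mk [("count", (0 : Int) + 1), ("points", 0)] := by
        simp [PySem.Dict.insert, PySem.Dict.contains]
      have h3 : (PySem.Dict.mk [("count", (0 : Int) + 1), ("points", 0)]).getD "points" 0 = 0 := by
        simp [PySem.Dict.getD, PySem.Dict.get?]
      have h4 : ((PySem.Dict.mk [("count", (0 : Int) + 1), ("points", 0)]).insert "points" ((0 : Int) + sc))
          = PySem.Dict.mk [("count", (0 : Int) + 1), ("points", (0 : Int) + sc)] := by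
        simp [PySem.Dict.insert, PySem.Dict.contains]
      rw [h1, h2, h3, h4, PySem.Dict.insert_insert_self]
      have hpts_new : pts et (0 + 1) (b + Δ) = 0 + sc := by
        unfold pts
        by_cases hph : et == "page.hit"
        · have hbz' := hbz (by simpa using hph)
          simp only [hph, if_true, hsc_def, hΔ, hbz']; ring
        · have := hΔ0 (by simpa using hph)
          simp only [hph, Bool.false_eq_true, if_false, hsc_def, this]; ring
      have hitems : (g.insert et (g.getD et 0 + 1)).items = g.items ++ [(et, (0 : Int) + 1)] := by
        rw [PySem.Dict.items_insert_of_not_contains g _ hcf, hgd]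
      have hsame : ∀ p ∈ g.items, pts p.1 p.2 (b + Δ) = pts p.1 p.2 b := by
        intro p hp
        obtain ⟨p1, p2⟩ := p
        apply pts_other p1 p2 b Δ et ?_ hΔ0
        intro hcon
        have hps : g.get? p1 = some p2 := PySem.Dict.get?_of_mem_items g hp hnd
        rw [hcon] at hps
        have hcc := PySem.Dict.contains_eq_isSome_get? (d := g) (k := et)
        rw [hcf, hps] at hcc
        simp at hcc
      refine Prod.ext ?_ ?_
      · show totOf g b + sc = totOf (g.insert et (g.getD et 0 + 1)) (b + Δ)
        unfold totOf
        rw [hitems, List.map_append, List.sum_append]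
        simp only [List.map_cons, List.map_nil, List.sum_cons, List.sum_nil, add_zero]
        rw [List.map_congr_left hsame, hpts_new]
        ring
      · apply PySem.Dict.ext
        rw [PySem.Dict.items_insert_of_not_contains _ _ (by rw [contains_toBreak]; exact hcf)]
        unfold toBreak
        rw [hitems, List.map_append]
        show (g.items.map _) ++ _ = (g.items.map _) ++ _
        congr 1
        · apply List.map_congr_left
          intro p hp
          rw [hsame p hp]
        · have h := hpts_new
          simp only [zero_add] at h
          simp [← h]

theorem inv_preserved (g : PySem.Dict String Int) (b : Int) (e : List (String × String))
    (hinv : BInv g b) : BInv (bPairStep (g, b) e).1 (bPairStep (g, b) e).2 := by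
  obtain ⟨hnd, hb⟩ := hinv
  unfold bPairStep BInv
  by_cases hemp : evType e = ""
  · simp [hemp]
    exact ⟨hnd, hb⟩
  · simp only [hemp, ne_eq, not_false_iff, if_pos]
    refine ⟨PySem.Dict.nodup_keys_insert _ _ _ hnd, ?_⟩
    intro hcon
    by_cases hph : evType e == "page.hit"
    · exfalso
      have het : evType e = "page.hit" := by simpa using hph
      rw [het, PySem.Dict.contains_insert_self] at hcon
      simp at hcon
    · simp only [hph, Bool.false_eq_true, if_false]
      apply hb
      rw [PySem.Dict.contains_insert] at hcon
      simpa using (Bool.or_eq_false_iff.mp hcon).2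

theorem fold_eq (evs : List (List (String × String))) :
    ∀ (g : PySem.Dict String Int) (b : Int), BInv g b →
      evs.foldl aStep (totOf g b, toBreak g b)
        = (totOf (evs.foldl bPairStep (g, b)).1 (evs.foldl bPairStep (g, b)).2,
           toBreak (evs.foldl bPairStep (g, b)).1 (evs.foldl bPairStep (g, b)).2) := by
  induction evs with
  | nil => intro g b _; simp
  | cons e rest ih =>
      intro g b hinv
      simp only [List.foldl_cons]
      rw [step_main g b e hinv]
      have := ih (bPairStep (g, b) e).1 (bPairStep (g, b) e).2 (inv_preserved g b e hinv)
      simpa using this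

-- ===== VERDICT (by name: the statement is the Claim_ definition above) =====
theorem calculate_activity_score_py_spec : Claim_equal_calculate_activity_score_py := by
  unfold Claim_equal_calculate_activity_score_py
  intro events _
  unfold Spec_calculate_activity_score_py calculate_activity_score_py calculate_activity_score_py_alt
  dsimp only
  have h0 : ((0 : Int), (PySem.Dict.empty : PySem.Dict String (PySem.Dict String Int)))
      = (totOf PySem.Dict.empty 0, toBreak PySem.Dict.empty 0) := rfl
  rw [h0, fold_eq events PySem.Dict.empty 0 ⟨by simp [PySem.Dict.keys_empty], by intro _; rfl⟩]
  set st := events.foldl bPairStep (PySem.Dict.empty, 0)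
  refine Prod.ext ?_ ?_
  · -- totals: B's derived sum over the breakdown equals A's accumulated total
    show totOf st.1 st.2 = _
    unfold totOf
    rw [List.map_map]
    apply congrArg List.sum
    apply List.map_congr_left
    intro p _
    simp [pts, PySem.Dict.getD, PySem.Dict.get?]
  · -- breakdowns: entries are literally equal
    show (toBreak st.1 st.2).items.map _ = _
    unfold toBreak
    rw [List.map_map]
    apply List.map_congr_left
    intro p _
    simp [pts]
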